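-- pv_equiv track=rewrite | github.com/TristanTrim/baye | baye.py | draw_b_probs
-- ===== SOURCE A (Python) =====
-- def draw_b_probs(tu,b,ab,anb):
--     string=""
--     for y in range(0,tu+1):
--
--         for x in range(0,tu+1):
--             if(y<b):
--                 if(x==ab):
--                     string+="|"
--                 else:
--                     string+=" "
--             elif(y>b):
--                 if(x==anb):
--                     string+="|"
--                 else:
--                     string+=" "
--             elif(x==ab or x==anb):
--                 string+="+"
--             else:
--                 string+="-"
--         string+="\n"
--     return(string)
-- ===== SOURCE B (Python) =====
-- def draw_b_probs(tu, b, ab, anb):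
--     # Build each distinct row once, then repeat: top rows (y<b), one mid row, bottom rows.
--     n = tu + 1
--     if n <= 0:
--         return ""
--
--     def bar(col):
--         cells = [" "] * n
--         if 0 <= col < n:
--             cells[col] = "|"
--         return "".join(cells) + "\n"
--
--     mid_cells = ["-"] * n
--     for c in (ab, anb):
--         if 0 <= c < n:
--             mid_cells[c] = "+"
--     mid = "".join(mid_cells) + "\n"
--
--     top = min(max(b, 0), n)          # rows with y < b
--     has_mid = 0 <= b < n             # row y == b exists
--     bottom = n - top - (1 if has_mid else 0)
--     return bar(ab) * top + (mid if has_mid else "") + bar(anb) * bottom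
-- ===== Notes on version B (the rewrite author's own statement) =====
-- stated objective: simpler
-- what changed: B computes the three distinct row strings (top bar row, mid row, bottom bar row) once via list placement and repeats them with string multiplication, replacing A's per-cell nested loops with quadratically many string concatenations.
import Mathlib
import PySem

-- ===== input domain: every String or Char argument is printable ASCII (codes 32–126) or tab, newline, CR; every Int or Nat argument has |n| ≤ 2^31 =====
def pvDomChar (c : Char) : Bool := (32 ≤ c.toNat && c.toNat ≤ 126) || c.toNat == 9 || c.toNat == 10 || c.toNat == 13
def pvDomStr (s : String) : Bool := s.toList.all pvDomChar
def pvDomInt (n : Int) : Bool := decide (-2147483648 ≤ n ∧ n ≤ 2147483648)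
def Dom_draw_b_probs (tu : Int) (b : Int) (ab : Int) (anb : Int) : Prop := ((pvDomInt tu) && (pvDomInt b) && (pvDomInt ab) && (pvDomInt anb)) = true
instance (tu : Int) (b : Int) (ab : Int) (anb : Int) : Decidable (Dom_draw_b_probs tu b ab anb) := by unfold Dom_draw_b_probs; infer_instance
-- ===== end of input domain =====

-- B builds the three distinct row strings once and repeats them, instead of A's per-cell double loop (objective: simpler).

-- ===== PORT A =====
def draw_b_probs (tu : Int) (b : Int) (ab : Int) (anb : Int) : String :=
  String.ofList <|
    (PySem.List.pyRange 0 (tu + 1) 1).foldl (fun s y =>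
      ((PySem.List.pyRange 0 (tu + 1) 1).foldl (fun s x =>
        if y < b then
          (if x = ab then s ++ ['|'] else s ++ [' '])
        else if y > b then
          (if x = anb then s ++ ['|'] else s ++ [' '])
        else if x = ab ∨ x = anb then s ++ ['+']
        else s ++ ['-']) s) ++ ['\n']) []

-- ===== PORT B =====
-- one bar row: n spaces with '|' at column col when in range, then '\n'
def pvBarRow (n : Int) (col : Int) : List Char :=
  (if 0 ≤ col ∧ col < n then (List.replicate n.toNat ' ').set col.toNat '|'
   else List.replicate n.toNat ' ') ++ ['\n']

def draw_b_probs_alt (tu : Int) (b : Int) (ab : Int) (anb : Int) : String :=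
  let n : Int := tu + 1
  if n ≤ 0 then "" else
    let mid : List Char :=
      ([ab, anb].foldl (fun cells c =>
        if 0 ≤ c ∧ c < n then cells.set c.toNat '+' else cells)
        (List.replicate n.toNat '-')) ++ ['\n']
    let top : Int := min (max b 0) n
    let hasMid : Bool := decide (0 ≤ b ∧ b < n)
    let bottom : Int := n - top - (if hasMid then 1 else 0)
    String.ofList ((List.replicate top.toNat (pvBarRow n ab)).flatten ++
      (if hasMid then mid else []) ++
      (List.replicate bottom.toNat (pvBarRow n anb)).flatten)

-- ===== PRECONDITION & SPEC =====
def Spec_draw_b_probs (tu : Int) (b : Int) (ab : Int) (anb : Int) (out : String) : Prop := out = draw_b_probs_alt tu b ab anb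
instance (tu : Int) (b : Int) (ab : Int) (anb : Int) (out : String) : Decidable (Spec_draw_b_probs tu b ab anb out) := by unfold Spec_draw_b_probs; infer_instance

-- ===== CLAIM (what is proved, stated in full; the proofs are below) =====
def Claim_equal_draw_b_probs : Prop := ∀ (tu : Int) (b : Int) (ab : Int) (anb : Int), Dom_draw_b_probs tu b ab anb → Spec_draw_b_probs tu b ab anb (draw_b_probs tu b ab anb)

-- ===== LEMMAS AND PROOFS =====

-- the character A writes at cell (y, x)
def pvCell (b ab anb : Int) (y x : Int) : Char :=
  if y < b then (if x = ab then '|' else ' ')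
  else if y > b then (if x = anb then '|' else ' ')
  else if x = ab ∨ x = anb then '+' else '-'

lemma inner_eq (b ab anb y : Int) (m : Int) (s : List Char) :
    (PySem.List.pyRange 0 m 1).foldl (fun s x =>
        if y < b then
          (if x = ab then s ++ ['|'] else s ++ [' '])
        else if y > b then
          (if x = anb then s ++ ['|'] else s ++ [' '])
        else if x = ab ∨ x = anb then s ++ ['+']
        else s ++ ['-']) s
      = s ++ (PySem.List.pyRange 0 m 1).map (pvCell b ab anb y) := by
  have hf : (fun (s : List Char) x =>
        if y < b then
          (if x = ab then s ++ ['|'] else s ++ [' '])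
        else if y > b then
          (if x = anb then s ++ ['|'] else s ++ [' '])
        else if x = ab ∨ x = anb then s ++ ['+']
        else s ++ ['-'])
      = fun s x => s ++ [pvCell b ab anb y x] := by
    funext s x; unfold pvCell; split_ifs <;> rfl
  rw [hf, PySem.List.foldl_append_singleton_eq_map]

lemma chars_A (tu b ab anb : Int) :
    (draw_b_probs tu b ab anb) =
      String.ofList ((PySem.List.pyRange 0 (tu + 1) 1).flatMap (fun y =>
        (PySem.List.pyRange 0 (tu + 1) 1).map (pvCell b ab anb y) ++ ['\n'])) := by
  unfold draw_b_probs
  congr 1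
  have hf : (fun (s : List Char) y =>
      ((PySem.List.pyRange 0 (tu + 1) 1).foldl (fun s x =>
        if y < b then
          (if x = ab then s ++ ['|'] else s ++ [' '])
        else if y > b then
          (if x = anb then s ++ ['|'] else s ++ [' '])
        else if x = ab ∨ x = anb then s ++ ['+']
        else s ++ ['-']) s) ++ ['\n'])
      = fun s y => s ++ ((PySem.List.pyRange 0 (tu + 1) 1).map (pvCell b ab anb y) ++ ['\n']) := by
    funext s y
    rw [inner_eq, List.append_assoc]
  rw [hf, PySem.List.foldl_append_eq_flatMap]
  simp

-- a map over range with 'if x = c' is a replicate with one cell set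
lemma map_eq_bar (m c : Int) (p q : Char) (hm : 0 < m) :
    (PySem.List.pyRange 0 m 1).map (fun x => if x = c then p else q)
      = if 0 ≤ c ∧ c < m then (List.replicate m.toNat q).set c.toNat p
        else List.replicate m.toNat q := by
  apply List.ext_getElem
  · simp [PySem.List.length_pyRange_one]
    split_ifs <;> simp
  · intro k h1 h2
    have hk : k < m.toNat := by
      simpa [PySem.List.length_pyRange_one] using h1
    simp only [List.getElem_map, PySem.List.getElem_pyRange_one]
    split_ifs with hc hr hr <;>
      simp only [List.getElem_set, List.getElem_replicate] <;>
      first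
        | rfl
        | omega
        | (split_ifs <;> first | rfl | omega)

-- the mid row: map over range with the two-column test is the fold of two sets
lemma map_eq_mid (m ab anb : Int) (hm : 0 < m) :
    (PySem.List.pyRange 0 m 1).map (fun x => if x = ab ∨ x = anb then '+' else '-')
      = [ab, anb].foldl (fun cells c =>
          if 0 ≤ c ∧ c < m then cells.set c.toNat '+' else cells)
          (List.replicate m.toNat '-') := by
  simp only [List.foldl_cons, List.foldl_nil]
  apply List.ext_getElem
  · simp [PySem.List.length_pyRange_one]
    split_ifs <;> simp
  · intro k h1 h2
    have hk : k < m.toNat := by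
      simpa [PySem.List.length_pyRange_one] using h1
    simp only [List.getElem_map, PySem.List.getElem_pyRange_one]
    split_ifs <;>
      simp only [List.getElem_set, List.getElem_replicate] <;>
      first
        | rfl
        | omega
        | (split_ifs <;> first | rfl | omega)

lemma flatMap_const_of (xs : List Int) (f : Int → List Char) (r : List Char)
    (h : ∀ y ∈ xs, f y = r) :
    xs.flatMap f = (List.replicate xs.length r).flatten := by
  induction xs with
  | nil => rfl
  | cons a l ih =>
    simp only [List.flatMap_cons, List.length_cons, List.replicate_succ, List.flatten_cons]
    rw [h a (by simp), ih (fun y hy => h y (by simp [hy]))]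

-- the row A produces at height y
def pvRow (tu b ab anb : Int) (y : Int) : List Char :=
  (PySem.List.pyRange 0 (tu + 1) 1).map (pvCell b ab anb y) ++ ['\n']

lemma pvRow_top (tu b ab anb y : Int) (hm : 0 < tu + 1) (hy : y < b) :
    pvRow tu b ab anb y = pvBarRow (tu + 1) ab := by
  unfold pvRow
  have hcell : pvCell b ab anb y = fun x => if x = ab then '|' else ' ' := by
    funext x; unfold pvCell; rw [if_pos hy]
  rw [hcell, map_eq_bar _ _ _ _ hm]
  unfold pvBarRow
  split_ifs <;> rfl

lemma pvRow_bot (tu b ab anb y : Int) (hm : 0 < tu + 1) (hy : b < y) :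
    pvRow tu b ab anb y = pvBarRow (tu + 1) anb := by
  unfold pvRow
  have hcell : pvCell b ab anb y = fun x => if x = anb then '|' else ' ' := by
    funext x; unfold pvCell; rw [if_neg (by omega), if_pos hy]
  rw [hcell, map_eq_bar _ _ _ _ hm]
  unfold pvBarRow
  split_ifs <;> rfl

lemma pvRow_mid (tu b ab anb : Int) (hm : 0 < tu + 1) :
    pvRow tu b ab anb b =
      ([ab, anb].foldl (fun cells c =>
          if 0 ≤ c ∧ c < tu + 1 then cells.set c.toNat '+' else cells)
          (List.replicate (tu + 1).toNat '-')) ++ ['\n'] := by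
  unfold pvRow
  have hcell : pvCell b ab anb b = fun x => if x = ab ∨ x = anb then '+' else '-' := by
    funext x; unfold pvCell; rw [if_neg (by omega), if_neg (by omega)]
  rw [hcell, map_eq_mid _ _ _ hm]

theorem draw_b_probs_spec : Claim_equal_draw_b_probs := by
  intro tu b ab anb _
  unfold Spec_draw_b_probs
  rw [chars_A]
  unfold draw_b_probs_alt
  by_cases hm : tu + 1 ≤ 0
  · simp only [hm, if_pos]
    rw [PySem.List.pyRange_one_eq_nil (by omega)]
    rfl
  · have hm' : 0 < tu + 1 := by omega
    simp only [hm, reduceIte]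
    congr 1
    show (PySem.List.pyRange 0 (tu + 1) 1).flatMap (pvRow tu b ab anb) = _
    by_cases hb0 : b < 0
    · -- every row is a bottom row
      have hdec : decide (0 ≤ b ∧ b < tu + 1) = false := by simp; omega
      have ht : min (max b 0) (tu + 1) = 0 := by omega
      rw [hdec, ht]
      rw [flatMap_const_of _ _ (pvBarRow (tu + 1) anb)
        (fun y hy => pvRow_bot tu b ab anb y hm'
          (by rw [PySem.List.mem_pyRange_one] at hy; omega))]
      simp [PySem.List.length_pyRange_one]
    · by_cases hbm : b < tu + 1
      · -- top rows, the mid row, bottom rows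
        have hdec : decide (0 ≤ b ∧ b < tu + 1) = true := by simp; omega
        have ht : min (max b 0) (tu + 1) = b := by omega
        rw [hdec, ht]
        have hsplit : PySem.List.pyRange 0 (tu + 1) 1
            = PySem.List.pyRange 0 b 1 ++ b :: PySem.List.pyRange (b + 1) (tu + 1) 1 := by
          rw [PySem.List.pyRange_one_append 0 b (tu + 1) (by omega) (by omega),
            PySem.List.pyRange_one_cons (show b < tu + 1 by omega)]
        rw [hsplit, List.flatMap_append, List.flatMap_cons]
        rw [flatMap_const_of (PySem.List.pyRange 0 b 1) _ (pvBarRow (tu + 1) ab)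
          (fun y hy => pvRow_top tu b ab anb y hm'
            (by rw [PySem.List.mem_pyRange_one] at hy; omega))]
        rw [flatMap_const_of (PySem.List.pyRange (b + 1) (tu + 1) 1) _ (pvBarRow (tu + 1) anb)
          (fun y hy => pvRow_bot tu b ab anb y hm'
            (by rw [PySem.List.mem_pyRange_one] at hy; omega))]
        rw [pvRow_mid tu b ab anb hm']
        simp only [PySem.List.length_pyRange_one, if_true, List.append_assoc]
        have h1 : (b - 0).toNat = b.toNat := by omega
        have h2 : (tu + 1 - (b + 1)).toNat = (tu + 1 - b - 1).toNat := by omega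
        rw [h1, h2]
      · -- every row is a top row
        have hdec : decide (0 ≤ b ∧ b < tu + 1) = false := by simp; omega
        have ht : min (max b 0) (tu + 1) = tu + 1 := by omega
        rw [hdec, ht]
        rw [flatMap_const_of _ _ (pvBarRow (tu + 1) ab)
          (fun y hy => pvRow_top tu b ab anb y hm'
            (by rw [PySem.List.mem_pyRange_one] at hy; omega))]
        simp [PySem.List.length_pyRange_one]
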